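-- pv_equiv track=rewrite | github.com/modiharsh/DSA | LC_3304.py | kthCharacter
-- ===== SOURCE A (Python) =====
-- def kthCharacter(k: int) -> str:
--     # iterative solution O(n)
--     # word = ['a']
--     # while len(word) < k:
--     #     next_part = [(chr(((ord(ch) - ord('a') + 1) % 26) + ord('a')))  for ch in word]
--     #     word.extend(next_part)
--     # return word[k-1]
--
--     # Recursive solution O(log n)
--     def get_char(k, layer):
--         if layer == 0:
--             return 'a'
--         half = 1 << (layer -1)
--         if k <= half:
--             return get_char(k, layer-1)
--         prev = get_char(k - half, layer-1)
--         return chr(((ord(prev) - ord('a') + 1) % 26) + ord('a'))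
--
--     layer = 0
--     while (1<<layer) < k:
--         layer += 1
--     return get_char(k, layer)
-- ===== SOURCE B (Python) =====
-- def kthCharacter(k: int) -> str:
--     # closed form: the k-th character is 'a' shifted by popcount(k-1) mod 26
--     if k <= 1:
--         return 'a'
--     return chr(ord('a') + bin(k - 1).count('1') % 26)
-- ===== Notes on version B (the rewrite author's own statement) =====
-- stated objective: simpler
-- what changed: Replaced the recursion over layers plus the layer-finding loop with the closed form 'a' shifted by popcount(k-1) mod 26.
import Mathlib
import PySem

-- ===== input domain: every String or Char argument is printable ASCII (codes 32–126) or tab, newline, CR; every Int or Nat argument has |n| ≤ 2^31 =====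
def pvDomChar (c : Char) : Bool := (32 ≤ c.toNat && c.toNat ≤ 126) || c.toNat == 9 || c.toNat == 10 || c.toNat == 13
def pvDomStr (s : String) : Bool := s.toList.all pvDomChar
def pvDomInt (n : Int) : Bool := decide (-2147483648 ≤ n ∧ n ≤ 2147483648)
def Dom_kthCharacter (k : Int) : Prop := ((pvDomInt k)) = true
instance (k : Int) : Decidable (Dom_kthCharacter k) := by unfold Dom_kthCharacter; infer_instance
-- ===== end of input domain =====

-- B replaces A's layer recursion by the closed form 'a' shifted by popcount(k-1) mod 26 (simpler; return-value equivalence).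

-- ===== PORT A =====
-- get_char(k, layer) of A; 2 ^ l is Python's `1 << (layer-1)`
def pvGetChar (k : Int) (layer : Nat) : Char :=
  match layer with
  | 0 => 'a'
  | l + 1 =>
    let half : Int := 2 ^ l
    if k ≤ half then pvGetChar k l
    else
      let prev := pvGetChar (k - half) l
      Char.ofNat (((prev.toNat - 97 + 1) % 26) + 97)

-- the `while (1<<layer) < k: layer += 1` loop of A
def pvFindLayer (k : Int) (layer : Nat) : Nat :=
  if (2 : Int) ^ layer < k then pvFindLayer k (layer + 1) else layer
termination_by k.toNat - layer
decreasing_by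
  have h1 : (layer : Int) < 2 ^ layer := by
    exact_mod_cast Nat.lt_two_pow_self
  omega

def kthCharacter (k : Int) : String :=
  String.mk [pvGetChar k (pvFindLayer k 0)]

-- ===== PORT B =====
-- bin(n).count('1')
def pvPopcount (n : Nat) : Nat :=
  if n = 0 then 0 else pvPopcount (n / 2) + n % 2

def kthCharacter_alt (k : Int) : String :=
  if k ≤ 1 then "a"
  else String.mk [Char.ofNat (97 + pvPopcount (k - 1).toNat % 26)]

-- ===== PRECONDITION & SPEC =====
def Spec_kthCharacter (k : Int) (out : String) : Prop := out = kthCharacter_alt k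
instance (k : Int) (out : String) : Decidable (Spec_kthCharacter k out) := by unfold Spec_kthCharacter; infer_instance

-- ===== CLAIM (what is proved, stated in full; the proofs are below) =====
def Claim_equal_kthCharacter : Prop := ∀ (k : Int), Dom_kthCharacter k → Spec_kthCharacter k (kthCharacter k)

-- ===== LEMMAS AND PROOFS =====

theorem pvPopcount_step (m : Nat) : pvPopcount m = pvPopcount (m / 2) + m % 2 := by
  rw [pvPopcount]
  split
  · subst ‹m = 0›; simp [pvPopcount]
  · rfl

theorem pvPopcount_pow_add (t m : Nat) (h : m < 2 ^ t) :
    pvPopcount (2 ^ t + m) = pvPopcount m + 1 := by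
  induction t generalizing m with
  | zero =>
    have : m = 0 := by omega
    subst this
    simp [pvPopcount]
  | succ t ih =>
    have h2 : 2 ^ (t + 1) = 2 * 2 ^ t := by ring
    have hdiv : (2 ^ (t + 1) + m) / 2 = 2 ^ t + m / 2 := by omega
    have hmod : (2 ^ (t + 1) + m) % 2 = m % 2 := by omega
    rw [pvPopcount_step (2 ^ (t + 1) + m), hdiv, hmod, ih (m / 2) (by omega),
        pvPopcount_step m]
    omega

theorem toNat_ofNat_small (v : Nat) (h : v < 128) : (Char.ofNat v).toNat = v := by
  have hv : v.isValidChar := Or.inl (by omega)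
  simp [Char.ofNat, hv, Char.toNat, Char.ofNatAux]

theorem pvGetChar_eq (layer : Nat) : ∀ (k : Int), 1 ≤ k → k ≤ 2 ^ layer →
    pvGetChar k layer = Char.ofNat (97 + pvPopcount (k - 1).toNat % 26) := by
  induction layer with
  | zero =>
    intro k h1 h2
    have : k = 1 := by omega
    subst this
    simp [pvGetChar, pvPopcount]
  | succ l ih =>
    intro k h1 h2
    have hpow : ((2 : Int) ^ l) = ((2 ^ l : Nat) : Int) := by push_cast; ring
    by_cases hk : k ≤ (2 : Int) ^ l
    · rw [pvGetChar]
      simp only [hk, if_pos]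
      exact ih k h1 hk
    · rw [not_le] at hk
      have hsum : (2 : Int) ^ (l + 1) = 2 ^ l + 2 ^ l := by ring
      have hrec := ih (k - 2 ^ l) (by omega) (by omega)
      rw [pvGetChar]
      simp only [hk.not_ge, if_false]
      rw [hrec]
      have hp26 : pvPopcount (k - 2 ^ l - 1).toNat % 26 < 26 := Nat.mod_lt _ (by omega)
      rw [toNat_ofNat_small _ (by omega)]
      have hsplit : (k - 1).toNat = 2 ^ l + (k - 2 ^ l - 1).toNat := by omega
      have hlt : (k - 2 ^ l - 1).toNat < 2 ^ l := by omega
      rw [hsplit, pvPopcount_pow_add l _ hlt]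
      congr 1
      omega

theorem pvFindLayer_ge (k : Int) (layer : Nat) : k ≤ 2 ^ (pvFindLayer k layer) := by
  rw [pvFindLayer]
  split
  · exact pvFindLayer_ge k (layer + 1)
  · omega
termination_by k.toNat - layer
decreasing_by
  have h1 : (layer : Int) < 2 ^ layer := by
    exact_mod_cast Nat.lt_two_pow_self
  omega

theorem pvFindLayer_of_le_one (k : Int) (h : k ≤ 1) : pvFindLayer k 0 = 0 := by
  rw [pvFindLayer]
  simp
  omega

-- ===== VERDICT (by name: the statement is the Claim_ definition above) =====
theorem kthCharacter_spec : Claim_equal_kthCharacter := by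
  intro k _
  unfold Spec_kthCharacter kthCharacter kthCharacter_alt
  by_cases hk : k ≤ 1
  · rw [pvFindLayer_of_le_one k hk]
    simp [hk, pvGetChar]
    decide
  · simp only [if_neg hk]
    rw [pvGetChar_eq _ k (by omega) (pvFindLayer_ge k 0)]
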